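-- pv_equiv track=rewrite | github.com/ckoons/BubbleSpacetimeTheory | play/toy_301_expansion_silence.py | make_residual
-- ===== SOURCE A (Python) =====
-- def make_residual(clauses, var, value):
--     """
--     Simplify formula by fixing variable var to value.
--     Returns (residual_clauses, n_removed, n_shortened, has_empty).
--     """
--     residual = []
--     removed = 0
--     shortened = 0
--     has_empty = False
--
--     for clause in clauses:
--         new_lits = []
--         satisfied = False
--         for lit in clause:
--             v = abs(lit)
--             if v == var:
--                 # This literal involves our fixed variable
--                 if (lit > 0 and value) or (lit < 0 and not value):
--                     satisfied = True
--                     break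
--                 else:
--                     # Literal is falsified, skip it
--                     continue
--             else:
--                 new_lits.append(lit)
--
--         if satisfied:
--             removed += 1
--             continue
--
--         if not new_lits:
--             has_empty = True
--             continue
--
--         if len(new_lits) < len(clause):
--             shortened += 1
--
--         residual.append(tuple(new_lits))
--
--     return residual, removed, shortened, has_empty
-- ===== SOURCE B (Python) =====
-- def make_residual(clauses, var, value):
--     """Simplify formula by fixing variable var to value.
--     Returns (residual_clauses, n_removed, n_shortened, has_empty).
--
--     Staged dataflow pipeline: compute per-clause satisfaction flags and
--     filtered clauses as whole-list maps, then derive the four results by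
--     independent aggregations over the zipped lists."""
--     sat_flags = [any(abs(l) == var and ((l > 0) if value else (l < 0)) for l in c)
--                  for c in clauses]
--     filtered = [tuple(l for l in c if abs(l) != var) for c in clauses]
--     removed = sum(sat_flags)
--     survivors = [(f, len(c)) for f, c, s in zip(filtered, clauses, sat_flags) if not s]
--     residual = [f for f, _ in survivors if f]
--     has_empty = any(not f for f, _ in survivors)
--     shortened = sum(1 for f, n in survivors if f and len(f) < n)
--     return residual, removed, shortened, has_empty
-- ===== Notes on version B (the rewrite author's own statement) =====
-- stated objective: alternative
-- what changed: Replaces A's single stateful loop over clauses (four mutable accumulators, per-clause break/continue inner scan) with a staged dataflow pipeline: whole-list maps computing satisfaction flags and filtered clauses, a zip selecting survivors, and four independent aggregations (sum/any/comprehensions) producing the results.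
import Mathlib
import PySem

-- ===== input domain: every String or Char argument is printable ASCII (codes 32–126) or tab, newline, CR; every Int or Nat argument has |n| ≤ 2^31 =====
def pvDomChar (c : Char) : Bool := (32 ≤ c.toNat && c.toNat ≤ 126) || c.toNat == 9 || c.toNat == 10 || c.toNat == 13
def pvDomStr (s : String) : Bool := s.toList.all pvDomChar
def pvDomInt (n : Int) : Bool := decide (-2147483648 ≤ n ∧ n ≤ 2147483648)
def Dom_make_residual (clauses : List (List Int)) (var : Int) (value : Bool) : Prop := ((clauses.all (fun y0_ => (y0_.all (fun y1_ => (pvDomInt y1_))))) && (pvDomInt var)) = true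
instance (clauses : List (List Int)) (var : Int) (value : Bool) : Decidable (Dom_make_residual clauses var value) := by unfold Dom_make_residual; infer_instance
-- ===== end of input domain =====

-- B replaces A's single stateful per-clause loop with a staged dataflow pipeline
-- (maps + zip + independent aggregations): an alternative decomposition, same cost.

-- ===== PORT A =====
-- inner 'for lit in clause' loop of A: carries the new_lits accumulator, breaks
-- (returns satisfied = true) at the first satisfying literal
def pvAScan (var : Int) (value : Bool) (acc : List Int) : List Int → List Int × Bool
  | [] => (acc, false)
  | lit :: rest =>
    if |lit| = var then
      if (decide (lit > 0) && value) || (decide (lit < 0) && !value) then (acc, true)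
      else pvAScan var value acc rest
    else pvAScan var value (acc ++ [lit]) rest

-- body of A's 'for clause in clauses' loop
def pvAStep (var : Int) (value : Bool) (st : List (List Int) × Int × Int × Bool)
    (clause : List Int) : List (List Int) × Int × Int × Bool :=
  let (residual, removed, shortened, has_empty) := st
  let (new_lits, satisfied) := pvAScan var value [] clause
  if satisfied then (residual, removed + 1, shortened, has_empty)
  else if new_lits = [] then (residual, removed, shortened, true)
  else if new_lits.length < clause.length then
    (residual ++ [new_lits], removed, shortened + 1, has_empty)
  else (residual ++ [new_lits], removed, shortened, has_empty)

def make_residual (clauses : List (List Int)) (var : Int) (value : Bool) : List (List Int) × Int × Int × Bool :=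
  clauses.foldl (pvAStep var value) ([], 0, 0, false)

-- ===== PORT B =====
def make_residual_alt (clauses : List (List Int)) (var : Int) (value : Bool) : List (List Int) × Int × Int × Bool :=
  let sat_flags := clauses.map (fun c =>
    c.any (fun l => decide (|l| = var) && (if value then decide (l > 0) else decide (l < 0))))
  let filtered := clauses.map (fun c => c.filter (fun l => !decide (|l| = var)))
  let removed : Int := ((sat_flags.filter (fun b => b)).length : Int)
  let survivors := ((filtered.zip (clauses.map List.length)).zip sat_flags).filterMap
    (fun p => if p.2 then none else some p.1)
  let residual := (survivors.map Prod.fst).filter (fun f => !decide (f = []))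
  let has_empty := survivors.any (fun p => decide (p.1 = []))
  let shortened : Int := ((survivors.filter (fun p => !decide (p.1 = []) && decide (p.1.length < p.2))).length : Int)
  (residual, removed, shortened, has_empty)

-- ===== PRECONDITION & SPEC =====
def Spec_make_residual (clauses : List (List Int)) (var : Int) (value : Bool) (out : List (List Int) × Int × Int × Bool) : Prop := out = make_residual_alt clauses var value
instance (clauses : List (List Int)) (var : Int) (value : Bool) (out : List (List Int) × Int × Int × Bool) : Decidable (Spec_make_residual clauses var value out) := by unfold Spec_make_residual; infer_instance

-- ===== CLAIM (what is proved, stated in full; the proofs are below) =====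
def Claim_equal_make_residual : Prop := ∀ (clauses : List (List Int)) (var : Int) (value : Bool), Dom_make_residual clauses var value → Spec_make_residual clauses var value (make_residual clauses var value)

-- ===== LEMMAS AND PROOFS =====

-- A's per-literal satisfaction test equals B's
theorem pv_cond_eq (value : Bool) (l : Int) :
    ((decide (l > 0) && value) || (decide (l < 0) && !value))
      = (if value then decide (l > 0) else decide (l < 0)) := by
  cases value <;> simp

-- satisfaction flag of A's inner scan = B's any-test
theorem pvAScan_snd (var : Int) (value : Bool) (clause : List Int) : ∀ acc : List Int,
    (pvAScan var value acc clause).2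
      = clause.any (fun l => decide (|l| = var) && (if value then decide (l > 0) else decide (l < 0))) := by
  induction clause with
  | nil => intro acc; simp [pvAScan]
  | cons l rest ih =>
    intro acc
    by_cases h : |l| = var
    · simp only [pvAScan, List.any_cons, h, decide_true, Bool.true_and, ← pv_cond_eq value l]
      cases hc : ((decide (l > 0) && value) || (decide (l < 0) && !value))
      · simp [ih]
      · simp
    · simp [pvAScan, h, ih]

-- when no literal satisfies, A's inner scan accumulates exactly B's filter
theorem pvAScan_filter (var : Int) (value : Bool) (clause : List Int)
    (hns : clause.any (fun l => decide (|l| = var) && (if value then decide (l > 0) else decide (l < 0))) = false) :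
    ∀ acc : List Int,
    pvAScan var value acc clause = (acc ++ clause.filter (fun l => !decide (|l| = var)), false) := by
  induction clause with
  | nil => intro acc; simp [pvAScan]
  | cons l rest ih =>
    intro acc
    simp only [List.any_cons, Bool.or_eq_false_iff] at hns
    obtain ⟨h1, h2⟩ := hns
    by_cases h : |l| = var
    · have hc : ((decide (l > 0) && value) || (decide (l < 0) && !value)) = false := by
        rw [pv_cond_eq value l]; simpa [h] using h1
      simp [pvAScan, h, hc, ih h2]
    · simp [pvAScan, h, ih h2]

-- how B's pipeline unfolds over a cons
theorem alt_cons (c : List Int) (rest : List (List Int)) (var : Int) (value : Bool) :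
    make_residual_alt (c :: rest) var value =
      (let B := make_residual_alt rest var value
       if c.any (fun l => decide (|l| = var) && (if value then decide (l > 0) else decide (l < 0))) then
         (B.1, B.2.1 + 1, B.2.2.1, B.2.2.2)
       else
         let f := c.filter (fun l => !decide (|l| = var))
         if f = [] then (B.1, B.2.1, B.2.2.1, true)
         else if f.length < c.length then (f :: B.1, B.2.1, B.2.2.1 + 1, B.2.2.2)
         else (f :: B.1, B.2.1, B.2.2.1, B.2.2.2)) := by
  by_cases hs : c.any (fun l => decide (|l| = var) && (if value then decide (l > 0) else decide (l < 0)))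
  · simp [make_residual_alt, hs,
      -List.filter_eq_nil_iff, -List.length_filter_lt_length_iff_exists]
  · by_cases he : c.filter (fun l => !decide (|l| = var)) = []
    · simp [make_residual_alt, hs, he,
        -List.filter_eq_nil_iff, -List.length_filter_lt_length_iff_exists]
    · by_cases hlt : (c.filter (fun l => !decide (|l| = var))).length < c.length
      · simp [make_residual_alt, hs, he, hlt,
          -List.filter_eq_nil_iff, -List.length_filter_lt_length_iff_exists]
      · simp [make_residual_alt, hs, he, hlt,
          -List.filter_eq_nil_iff, -List.length_filter_lt_length_iff_exists]

-- A's fold from an arbitrary state = state combined with B's pipeline result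
theorem fold_eq (var : Int) (value : Bool) : ∀ (clauses : List (List Int))
    (r : List (List Int)) (rm sh : Int) (he : Bool),
    List.foldl (pvAStep var value) (r, rm, sh, he) clauses =
      (r ++ (make_residual_alt clauses var value).1,
       rm + (make_residual_alt clauses var value).2.1,
       sh + (make_residual_alt clauses var value).2.2.1,
       he || (make_residual_alt clauses var value).2.2.2) := by
  intro clauses
  induction clauses with
  | nil => intro r rm sh he; simp [make_residual_alt]
  | cons c rest ih =>
    intro r rm sh he
    rw [List.foldl_cons, alt_cons]
    by_cases hs : c.any (fun l => decide (|l| = var) && (if value then decide (l > 0) else decide (l < 0)))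
    · have hstep : pvAStep var value (r, rm, sh, he) c = (r, rm + 1, sh, he) := by
        simp only [pvAStep]
        have := pvAScan_snd var value c []
        rw [hs] at this
        cases h : pvAScan var value [] c with
        | mk nl sat => rw [h] at this; simp at this; simp [this]
      rw [hstep, ih]
      simp [hs]
      omega
    · have hns : c.any (fun l => decide (|l| = var) && (if value then decide (l > 0) else decide (l < 0))) = false := by
        simpa using hs
      have hscan := pvAScan_filter var value c hns []
      simp only [List.nil_append] at hscan
      by_cases hemp : c.filter (fun l => !decide (|l| = var)) = []
      · have hstep : pvAStep var value (r, rm, sh, he) c = (r, rm, sh, true) := by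
          simp [pvAStep, hscan, hemp]
        rw [hstep, ih]
        simp [hs, hemp]
      · by_cases hlt : (c.filter (fun l => !decide (|l| = var))).length < c.length
        · have hstep : pvAStep var value (r, rm, sh, he) c
              = (r ++ [c.filter (fun l => !decide (|l| = var))], rm, sh + 1, he) := by
            simp [pvAStep, hscan, hemp, hlt]
          rw [hstep, ih]
          simp [hs, hemp, hlt]
          omega
        · have hstep : pvAStep var value (r, rm, sh, he) c
              = (r ++ [c.filter (fun l => !decide (|l| = var))], rm, sh, he) := by
            simp [pvAStep, hscan, hemp, hlt]
          rw [hstep, ih]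
          simp [hs, hemp, hlt]

-- ===== VERDICT (by name: the statement is the Claim_ definition above) =====
theorem make_residual_spec : Claim_equal_make_residual := by
  intro clauses var value _
  unfold Spec_make_residual make_residual
  rw [fold_eq]
  simp
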